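-- pv_equiv track=rewrite | github.com/usavet253/usavet-data | usavet_real_data_engine_v1.py | census_adjustments
-- ===== SOURCE A (Python) =====
-- DOMAINS = ["housing", "cost_of_living", "employment", "morale", "benefits", "media"]
--
-- def census_adjustments(census):
--     adjustments = {domain: 0 for domain in DOMAINS}
--     rent = census.get("median_gross_rent")
--     home_value = census.get("median_home_value")
--
--     if rent is not None:
--         if rent >= 1800:
--             adjustments["cost_of_living"] -= 2
--             adjustments["housing"] -= 1
--         elif rent >= 1500:
--             adjustments["cost_of_living"] -= 1
--
--     if home_value is not None:
--         if home_value >= 400000: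
--             adjustments["housing"] -= 2
--             adjustments["cost_of_living"] -= 1
--         elif home_value >= 300000:
--             adjustments["housing"] -= 1
--
--     return adjustments
-- ===== SOURCE B (Python) =====
-- DOMAINS = ["housing", "cost_of_living", "employment", "morale", "benefits", "media"]
--
-- RULES = [
--     ("median_gross_rent", [(1800, [("cost_of_living", -2), ("housing", -1)]),
--                            (1500, [("cost_of_living", -1)])]),
--     ("median_home_value", [(400000, [("housing", -2), ("cost_of_living", -1)]),
--                            (300000, [("housing", -1)])]),
-- ]
--
-- def census_adjustments(census):
--     adjustments = dict.fromkeys(DOMAINS, 0)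
--     for field, rules in RULES:
--         value = census.get(field)
--         if value is None:
--             continue
--         for threshold, deltas in rules:
--             if value >= threshold:
--                 for domain, delta in deltas:
--                     adjustments[domain] += delta
--                 break
--     return adjustments
-- ===== Notes on version B (the rewrite author's own statement) =====
-- stated objective: alternative
-- what changed: Replaced the two hard-coded if/elif cascades with a declarative rule table (field -> ordered (threshold, deltas) rows) applied by a single first-match-wins loop.
import Mathlib
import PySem

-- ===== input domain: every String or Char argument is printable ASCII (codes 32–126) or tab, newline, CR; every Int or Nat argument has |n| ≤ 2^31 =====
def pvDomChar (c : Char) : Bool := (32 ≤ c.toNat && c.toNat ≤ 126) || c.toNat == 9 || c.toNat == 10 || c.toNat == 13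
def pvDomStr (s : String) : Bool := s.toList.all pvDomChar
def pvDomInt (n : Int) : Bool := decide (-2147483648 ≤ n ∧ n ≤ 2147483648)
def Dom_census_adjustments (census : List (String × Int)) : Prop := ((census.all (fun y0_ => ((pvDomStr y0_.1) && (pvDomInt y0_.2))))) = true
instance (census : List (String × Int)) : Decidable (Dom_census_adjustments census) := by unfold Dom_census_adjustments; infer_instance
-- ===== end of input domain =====

-- B replaces A's two hard-coded if/elif cascades with a rule table scanned first-match-wins (objective: alternative, table-driven decomposition).

-- ===== PORT A =====
def pvDOMAINS : List String := ["housing", "cost_of_living", "employment", "morale", "benefits", "media"]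

def census_adjustments (census : List (String × Int)) : List (String × Int) :=
  let adjustments : PySem.Dict String Int :=
    pvDOMAINS.foldl (fun d k => d.insert k 0) PySem.Dict.empty
  let rent := census.lookup "median_gross_rent"
  let homeValue := census.lookup "median_home_value"
  let adjustments :=
    match rent with
    | none => adjustments
    | some r =>
      if r ≥ 1800 then
        ((adjustments.modify "cost_of_living" 0 (· - 2)).modify "housing" 0 (· - 1))
      else if r ≥ 1500 then
        adjustments.modify "cost_of_living" 0 (· - 1)
      else adjustments
  let adjustments :=
    match homeValue with
    | none => adjustments
    | some h =>
      if h ≥ 400000 then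
        ((adjustments.modify "housing" 0 (· - 2)).modify "cost_of_living" 0 (· - 1))
      else if h ≥ 300000 then
        adjustments.modify "housing" 0 (· - 1)
      else adjustments
  adjustments.items

-- ===== PORT B =====
def pvRULES : List (String × List (Int × List (String × Int))) :=
  [("median_gross_rent", [(1800, [("cost_of_living", -2), ("housing", -1)]),
                          (1500, [("cost_of_living", -1)])]),
   ("median_home_value", [(400000, [("housing", -2), ("cost_of_living", -1)]),
                          (300000, [("housing", -1)])])]

-- the inner 'for threshold, deltas in rules: if value >= threshold: … break'
def pvApplyFirst (adj : PySem.Dict String Int) (value : Int) :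
    List (Int × List (String × Int)) → PySem.Dict String Int
  | [] => adj
  | (threshold, deltas) :: rest =>
    if value ≥ threshold then
      deltas.foldl (fun (d : PySem.Dict String Int) p => d.modify p.1 0 (· + p.2)) adj
    else pvApplyFirst adj value rest

def census_adjustments_alt (census : List (String × Int)) : List (String × Int) :=
  (pvRULES.foldl
    (fun adj fr =>
      match census.lookup fr.1 with
      | none => adj
      | some value => pvApplyFirst adj value fr.2)
    (pvDOMAINS.foldl (fun d k => d.insert k 0) PySem.Dict.empty)).items

-- ===== PRECONDITION & SPEC =====
def Spec_census_adjustments (census : List (String × Int)) (out : List (String × Int)) : Prop := out = census_adjustments_alt census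
instance (census : List (String × Int)) (out : List (String × Int)) : Decidable (Spec_census_adjustments census out) := by unfold Spec_census_adjustments; infer_instance

-- ===== CLAIM (what is proved, stated in full; the proofs are below) =====
def Claim_equal_census_adjustments : Prop := ∀ (census : List (String × Int)), Dom_census_adjustments census → Spec_census_adjustments census (census_adjustments census)

-- ===== LEMMAS AND PROOFS =====
lemma census_adjustments_eq (census : List (String × Int)) :
    census_adjustments census = census_adjustments_alt census := by
  unfold census_adjustments census_adjustments_alt pvRULES
  simp only [List.foldl]
  rcases hr : census.lookup "median_gross_rent" with _ | r <;>
  rcases hh : census.lookup "median_home_value" with _ | h <;>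
  simp only [pvApplyFirst, List.foldl] <;>
  split_ifs <;> decide

-- ===== VERDICT (by name: the statement is the Claim_ definition above) =====
theorem census_adjustments_spec : Claim_equal_census_adjustments := by
  intro census _
  exact census_adjustments_eq census
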